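-- pv_equiv track=rewrite | github.com/phuchoang92/graduate_thesis | pages/3_Summary_Video.py | find_true_ranges
-- ===== SOURCE A (Python) =====
-- def find_true_ranges(data):
--     result = []
--     start = None
--
--     for i, value in enumerate(data):
--         if value and start is None:
--             start = i
--         elif not value and start is not None:
--             result.append((start, i - 1))
--             start = None
--
--     if start is not None:
--         result.append((start, len(data) - 1))
--
--     return result
-- ===== SOURCE B (Python) =====
-- def find_true_ranges(data):
--     result = []
--     n = len(data)
--     i = 0
--     while i < n:
--         if data[i]:
--             j = i + 1
--             while j < n and data[j]:
--                 j += 1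
--             result.append((i, j - 1))
--             i = j
--         else:
--             i += 1
--     return result
-- ===== Notes on version B (the rewrite author's own statement) =====
-- stated objective: alternative
-- what changed: Replaces the enumerate state machine with an Optional start sentinel and a post-loop flush by a two-pointer index scan: when a truthy element is found an inner while advances j to the end of the run, so each range is emitted immediately and no sentinel or flush exists.
import Mathlib
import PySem

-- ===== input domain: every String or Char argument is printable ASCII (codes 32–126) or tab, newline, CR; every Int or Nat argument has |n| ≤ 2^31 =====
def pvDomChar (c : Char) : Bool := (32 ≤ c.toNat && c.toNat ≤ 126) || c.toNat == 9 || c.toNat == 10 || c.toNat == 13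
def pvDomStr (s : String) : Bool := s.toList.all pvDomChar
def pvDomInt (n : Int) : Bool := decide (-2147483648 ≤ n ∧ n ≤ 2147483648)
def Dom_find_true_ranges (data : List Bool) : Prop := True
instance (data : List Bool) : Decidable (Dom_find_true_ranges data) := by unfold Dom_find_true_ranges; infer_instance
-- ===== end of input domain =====

-- B replaces A's start-sentinel state machine (with post-loop flush) by a two-pointer index
-- scan that consumes each run of True with an inner loop; alternative decomposition, same cost.

-- ===== PORT A =====
-- the loop body of A: state = (result, start); branches in A's order
def pvStepA (s : List (Int × Int) × Option Int) (iv : Int × Bool) : List (Int × Int) × Option Int :=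
  match s.2 with
  | none => if iv.2 then (s.1, some iv.1) else s
  | some s0 => if iv.2 then s else (s.1 ++ [(s0, iv.1 - 1)], none)

def find_true_ranges (data : List Bool) : List (Int × Int) :=
  let st := (PySem.List.enumerate data).foldl pvStepA ([], none)
  match st.2 with
  | none => st.1
  | some s0 => st.1 ++ [(s0, (data.length : Int) - 1)]

-- ===== PORT B =====
-- inner `while j < n and data[j]: j += 1`
def pvScan (data : List Bool) (n : Nat) (j : Nat) : Nat :=
  if h : j < n ∧ data.getD j false = true then pvScan data n (j + 1) else j
termination_by n - j
decreasing_by obtain ⟨h1, _⟩ := h; omega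

-- the port's outer loop needs this to terminate (j moves forward)
theorem pvScan_le (data : List Bool) (n j : Nat) : j ≤ pvScan data n j := by
  rw [pvScan]
  split
  next h => exact Nat.le_trans (Nat.le_succ j) (pvScan_le data n (j + 1))
  next => exact Nat.le_refl j
termination_by n - j
decreasing_by rename_i h; exact Nat.sub_succ_lt_self _ _ h.1

-- outer `while i < n`
def pvLoop (data : List Bool) (n : Nat) (i : Nat) (result : List (Int × Int)) : List (Int × Int) :=
  if h : i < n then
    if data.getD i false then
      let j := pvScan data n (i + 1)
      pvLoop data n j (result ++ [((i : Int), (j : Int) - 1)])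
    else pvLoop data n (i + 1) result
  else result
termination_by n - i
decreasing_by
  · have := pvScan_le data n (i + 1); omega
  · omega

def find_true_ranges_alt (data : List Bool) : List (Int × Int) :=
  pvLoop data data.length 0 []

-- ===== PRECONDITION & SPEC =====
def Spec_find_true_ranges (data : List Bool) (out : List (Int × Int)) : Prop := out = find_true_ranges_alt data
instance (data : List Bool) (out : List (Int × Int)) : Decidable (Spec_find_true_ranges data out) := by unfold Spec_find_true_ranges; infer_instance

-- ===== CLAIM (what is proved, stated in full; the proofs are below) =====
def Claim_equal_find_true_ranges : Prop := ∀ (data : List Bool), Dom_find_true_ranges data → Spec_find_true_ranges data (find_true_ranges data)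

-- ===== LEMMAS AND PROOFS =====

-- common reference: A's state machine as structural recursion (emitted list only)
def pvGo : List Bool → Int → Option Int → List (Int × Int)
  | [], _, none => []
  | [], i, some s => [(s, i - 1)]
  | x :: xs, i, none => if x then pvGo xs (i + 1) (some i) else pvGo xs (i + 1) none
  | x :: xs, i, some s => if x then pvGo xs (i + 1) (some s) else (s, i - 1) :: pvGo xs (i + 1) none

-- length of the leading run of `true`
def pvRun : List Bool → Nat
  | true :: xs => pvRun xs + 1
  | _ => 0

def pvFinish (r : List (Int × Int) × Option Int) (e : Int) : List (Int × Int) :=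
  match r.2 with
  | none => r.1
  | some s0 => r.1 ++ [(s0, e - 1)]

theorem pvFoldA (xs : List Bool) (i : Int) (acc : List (Int × Int)) (st : Option Int) :
    pvFinish ((PySem.List.enumerate xs i).foldl pvStepA (acc, st)) (i + xs.length) =
      acc ++ pvGo xs i st := by
  induction xs generalizing i acc st with
  | nil =>
    cases st <;> simp [PySem.List.enumerate_nil, pvFinish, pvGo]
  | cons x xs ih =>
    rw [PySem.List.enumerate_cons]
    have harith : i + ((x :: xs).length : Int) = (i + 1) + (xs.length : Int) := by
      simp only [List.length_cons]; push_cast; ring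
    rw [harith]
    cases st with
    | none =>
      cases x with
      | true =>
        simp only [List.foldl_cons, pvStepA]
        rw [ih]
        simp [pvGo]
      | false =>
        simp only [List.foldl_cons, pvStepA]
        rw [ih]
        simp [pvGo]
    | some s0 =>
      cases x with
      | true =>
        simp only [List.foldl_cons, pvStepA]
        rw [ih]
        simp [pvGo]
      | false =>
        simp only [List.foldl_cons, pvStepA]
        rw [ih]
        simp [pvGo]

theorem pvGo_some (xs : List Bool) (i s : Int) :
    pvGo xs i (some s) =
      (s, i + (pvRun xs : Int) - 1) :: pvGo (xs.drop (pvRun xs)) (i + (pvRun xs : Int)) none := by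
  induction xs generalizing i with
  | nil => simp [pvGo, pvRun]
  | cons x xs ih =>
    cases x with
    | true =>
      have h1 : pvRun (true :: xs) = pvRun xs + 1 := rfl
      simp only [pvGo, if_true, h1, List.drop_succ_cons]
      rw [ih]
      have : i + ((pvRun xs : Int) + 1) = (i + 1) + (pvRun xs : Int) := by ring
      push_cast
      rw [this]
    | false =>
      have h1 : pvRun (false :: xs) = 0 := rfl
      simp [pvGo, h1]

theorem pvScan_eq (data : List Bool) (j : Nat) :
    pvScan data data.length j = j + pvRun (data.drop j) := by
  rw [pvScan]
  split
  next h =>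
    obtain ⟨h1, h2⟩ := h
    have hdrop : data.drop j = data[j] :: data.drop (j + 1) := List.drop_eq_getElem_cons h1
    have hget : data[j] = true := by
      have : data.getD j false = data[j] := List.getD_eq_getElem data false h1
      rw [this] at h2; exact h2
    rw [pvScan_eq data (j + 1), hdrop, hget]
    simp [pvRun]; omega
  next h =>
    rcases Nat.lt_or_ge j data.length with hlt | hge
    · have h2 : data.getD j false = false := by
        by_contra hc
        exact h ⟨hlt, by simpa using hc⟩
      have hdrop : data.drop j = data[j] :: data.drop (j + 1) := List.drop_eq_getElem_cons hlt
      have hget : data[j] = false := by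
        have : data.getD j false = data[j] := List.getD_eq_getElem data false hlt
        rw [this] at h2; exact h2
      rw [hdrop, hget]
      simp [pvRun]
    · have : data.drop j = [] := List.drop_eq_nil_of_le hge
      rw [this]
      simp [pvRun]
termination_by data.length - j
decreasing_by rename_i h; exact Nat.sub_succ_lt_self _ _ h.1

theorem pvLoop_eq (data : List Bool) (i : Nat) (acc : List (Int × Int)) :
    pvLoop data data.length i acc = acc ++ pvGo (data.drop i) (i : Int) none := by
  rw [pvLoop]
  split
  next h =>
    have hdrop : data.drop i = data[i] :: data.drop (i + 1) := List.drop_eq_getElem_cons h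
    have hgetD : data.getD i false = data[i] := List.getD_eq_getElem data false h
    by_cases hv : data.getD i false
    · rw [if_pos hv]
      have hscan : pvScan data data.length (i + 1) = (i + 1) + pvRun (data.drop (i + 1)) :=
        pvScan_eq data (i + 1)
      have hrec : pvLoop data data.length (pvScan data data.length (i + 1))
            (acc ++ [((i : Int), (pvScan data data.length (i + 1) : Int) - 1)]) =
          (acc ++ [((i : Int), (pvScan data data.length (i + 1) : Int) - 1)]) ++
            pvGo (data.drop (pvScan data data.length (i + 1)))
              ((pvScan data data.length (i + 1) : Int)) none :=
        pvLoop_eq data (pvScan data data.length (i + 1))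
          (acc ++ [((i : Int), (pvScan data data.length (i + 1) : Int) - 1)])
      rw [hrec]
      have hgi : data[i] = true := by rw [← hgetD]; exact hv
      rw [hdrop, hgi]
      simp only [pvGo, if_true]
      rw [pvGo_some]
      have hdd : (data.drop (i + 1)).drop (pvRun (data.drop (i + 1))) =
          data.drop ((i + 1) + pvRun (data.drop (i + 1))) := by
        rw [List.drop_drop]
      rw [hdd, ← hscan]
      have hcast : ((i : Int) + 1) + (pvRun (data.drop (i + 1)) : Int) =
          ((pvScan data data.length (i + 1) : Int)) := by
        rw [hscan]; push_cast; ring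
      rw [hcast]
      simp
    · rw [if_neg hv]
      rw [pvLoop_eq data (i + 1) acc]
      have hgi : data[i] = false := by
        rw [← hgetD]; simpa using hv
      rw [hdrop, hgi]
      simp [pvGo]
  next h =>
    have : data.drop i = [] := List.drop_eq_nil_of_le (by omega)
    rw [this]
    simp [pvGo]
termination_by data.length - i
decreasing_by
  · have := pvScan_le data data.length (i + 1); omega
  · omega

theorem pvA_eq_go (data : List Bool) : find_true_ranges data = pvGo data 0 none := by
  have h := pvFoldA data 0 [] none
  simp only [zero_add, List.nil_append] at h
  unfold find_true_ranges
  rw [← h]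
  rfl

-- ===== VERDICT (by name: the statement is the Claim_ definition above) =====
theorem find_true_ranges_spec : Claim_equal_find_true_ranges := by
  intro data _
  unfold Spec_find_true_ranges find_true_ranges_alt
  rw [pvA_eq_go, pvLoop_eq]
  simp
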